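-- pv_equiv track=rewrite | github.com/JJaakson/School-Work | Python MainCourse/ex08_solution_and_test/solution.py | fruit_order
-- ===== SOURCE A (Python) =====
-- def fruit_order(small_baskets: int, big_baskets: int, ordered_amount: int) -> int:
--     """
--     Return number of small fruit baskets if it's possible to finish the order, otherwise return -1.
--
--     (5, 1, 9) -> 4
--     (3, 1, 10) -> -1
--     """
--     bigs = 0
--     small_baskets_needed = 0
--     smalls = 0
--     if big_baskets > 0:
--         for i in range(big_baskets):
--             bigs += 1
--             small_baskets_needed = ordered_amount - 5
--             ordered_amount = ordered_amount - 5
--             if small_baskets_needed < 0: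
--                 bigs -= 1
--                 break
--         for i in range(small_baskets):
--             if small_baskets_needed < 0:
--                 smalls = 5 + small_baskets_needed
--             elif small_baskets_needed > 0:
--                 smalls = small_baskets_needed
--     else:
--         smalls = ordered_amount
--     if small_baskets >= smalls:
--         return smalls
--     else:
--         return -1
-- ===== SOURCE B (Python) =====
-- def fruit_order(small_baskets: int, big_baskets: int, ordered_amount: int) -> int:
--     bigs_used = min(max(big_baskets, 0), max(ordered_amount, 0) // 5)
--     smalls = ordered_amount - 5 * bigs_used
--     return smalls if small_baskets >= smalls else -1
-- ===== Notes on version B (the rewrite author's own statement) =====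
-- stated objective: faster
-- what changed: Replaces A's two loops (one subtracting 5 per big basket with a break, one repeatedly overwriting smalls) by closed-form min/floor-division arithmetic.
-- intended difference: When big_baskets > 0 and small_baskets <= 0, A's smalls-loop never runs and leaves smalls = 0, so A answers 0 or -1 regardless of the uncovered remainder (e.g. A returns 0 for (0, 1, 9)); B computes the true remainder after the big baskets and returns it if it fits in the small baskets, else -1, which is the intended feasibility answer. — e.g. on fruit_order(0, 1, 9): A returns 0, B returns -1
import Mathlib
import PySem

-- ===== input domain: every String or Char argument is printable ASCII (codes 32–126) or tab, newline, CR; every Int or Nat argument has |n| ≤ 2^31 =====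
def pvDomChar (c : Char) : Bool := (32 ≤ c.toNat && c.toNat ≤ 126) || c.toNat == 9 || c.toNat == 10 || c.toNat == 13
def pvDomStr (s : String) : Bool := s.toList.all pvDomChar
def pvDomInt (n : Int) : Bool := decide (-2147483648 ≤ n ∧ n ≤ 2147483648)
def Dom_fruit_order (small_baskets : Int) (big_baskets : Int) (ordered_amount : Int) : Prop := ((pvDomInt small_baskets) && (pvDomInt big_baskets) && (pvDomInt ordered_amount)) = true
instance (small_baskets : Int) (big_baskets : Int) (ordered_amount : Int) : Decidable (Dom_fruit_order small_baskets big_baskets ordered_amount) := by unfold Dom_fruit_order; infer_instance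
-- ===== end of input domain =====

-- B replaces A's two loops by closed-form min / floor-division arithmetic (O(1) vs O(big+small));
-- on big_baskets > 0 with small_baskets ≤ 0 the two differ intentionally (see D_fruit_order).

-- ===== PORT A =====
-- first loop of A: state (bigs, small_baskets_needed, ordered_amount); break when needed < 0
def fruitLoop1 : Nat → Int → Int → Int → Int × Int × Int
  | 0, bigs, needed, ord => (bigs, needed, ord)
  | Nat.succ n, bigs, _, ord =>
      if ord - 5 < 0 then (bigs + 1 - 1, ord - 5, ord - 5)
      else fruitLoop1 n (bigs + 1) (ord - 5) (ord - 5)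

-- second loop of A: reassigns smalls once per iteration of range(small_baskets)
def fruitLoop2 : Nat → Int → Int → Int
  | 0, _, smalls => smalls
  | Nat.succ n, needed, smalls =>
      fruitLoop2 n needed
        (if needed < 0 then 5 + needed else if needed > 0 then needed else smalls)

def fruit_order (small_baskets : Int) (big_baskets : Int) (ordered_amount : Int) : Int :=
  if big_baskets > 0 then
    let st := fruitLoop1 big_baskets.toNat 0 0 ordered_amount
    let smalls := fruitLoop2 small_baskets.toNat st.2.1 0
    if small_baskets ≥ smalls then smalls else -1
  else
    let smalls := ordered_amount
    if small_baskets ≥ smalls then smalls else -1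

-- ===== PORT B =====
def fruit_order_alt (small_baskets : Int) (big_baskets : Int) (ordered_amount : Int) : Int :=
  let bigs_used := min (max big_baskets 0) (PySem.Int.floordiv (max ordered_amount 0) 5)
  let smalls := ordered_amount - 5 * bigs_used
  if small_baskets ≥ smalls then smalls else -1

-- ===== PRECONDITION & SPEC =====
-- When big_baskets > 0 and small_baskets ≤ 0, A's smalls-loop never runs and leaves smalls = 0,
-- so A answers 0 or -1 regardless of the uncovered remainder (A returns 0 for (0, 1, 9));
-- B computes the true remainder after the big baskets and returns it if it fits, else -1 — the intended answer.
def D_fruit_order (small_baskets : Int) (big_baskets : Int) (ordered_amount : Int) : Prop :=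
  0 < big_baskets ∧ small_baskets ≤ 0 ∧
    ((small_baskets = 0 ∧ (ordered_amount < 0 ∨ ordered_amount % 5 ≠ 0 ∨ 5 * big_baskets < ordered_amount)) ∨
     (small_baskets < 0 ∧ ordered_amount ≤ small_baskets ∧ ordered_amount ≠ -1))
instance (small_baskets : Int) (big_baskets : Int) (ordered_amount : Int) : Decidable (D_fruit_order small_baskets big_baskets ordered_amount) := by unfold D_fruit_order; infer_instance

def Spec_fruit_order (small_baskets : Int) (big_baskets : Int) (ordered_amount : Int) (out : Int) : Prop := ¬ D_fruit_order small_baskets big_baskets ordered_amount → out = fruit_order_alt small_baskets big_baskets ordered_amount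
instance (small_baskets : Int) (big_baskets : Int) (ordered_amount : Int) (out : Int) : Decidable (Spec_fruit_order small_baskets big_baskets ordered_amount out) := by unfold Spec_fruit_order; infer_instance

def pvDiffWitness_fruit_order : Int × Int × Int := (0, 1, 9)
def pvDiffWitnessOut_fruit_order : Int × Int := (0, -1)

-- ===== CLAIM (what is proved, stated in full; the proofs are below) =====
def Claim_unchanged_fruit_order : Prop := ∀ (small_baskets : Int) (big_baskets : Int) (ordered_amount : Int), Dom_fruit_order small_baskets big_baskets ordered_amount → Spec_fruit_order small_baskets big_baskets ordered_amount (fruit_order small_baskets big_baskets ordered_amount)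
def Claim_changed_fruit_order : Prop := Dom_fruit_order (pvDiffWitness_fruit_order.1) (pvDiffWitness_fruit_order.2.1) (pvDiffWitness_fruit_order.2.2) ∧ D_fruit_order (pvDiffWitness_fruit_order.1) (pvDiffWitness_fruit_order.2.1) (pvDiffWitness_fruit_order.2.2) ∧ fruit_order (pvDiffWitness_fruit_order.1) (pvDiffWitness_fruit_order.2.1) (pvDiffWitness_fruit_order.2.2) = pvDiffWitnessOut_fruit_order.1 ∧ fruit_order_alt (pvDiffWitness_fruit_order.1) (pvDiffWitness_fruit_order.2.1) (pvDiffWitness_fruit_order.2.2) = pvDiffWitnessOut_fruit_order.2 ∧ pvDiffWitnessOut_fruit_order.1 ≠ pvDiffWitnessOut_fruit_order.2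
def Claim_exact_fruit_order : Prop := ∀ (small_baskets : Int) (big_baskets : Int) (ordered_amount : Int), Dom_fruit_order small_baskets big_baskets ordered_amount → D_fruit_order small_baskets big_baskets ordered_amount → fruit_order small_baskets big_baskets ordered_amount ≠ fruit_order_alt small_baskets big_baskets ordered_amount

-- ===== LEMMAS AND PROOFS =====

-- A's first loop leaves small_baskets_needed = ord - 5 * min(n, (0 ≤ ord ? ord/5 : 0) + 1)
lemma fruitLoop1_needed : ∀ (n : Nat) (bigs needed ord : Int), 1 ≤ n →
    (fruitLoop1 n bigs needed ord).2.1
      = ord - 5 * min (n : Int) ((if 0 ≤ ord then ord / 5 else 0) + 1) := by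
  intro n
  induction n with
  | zero => intro _ _ _ h; omega
  | succ n ih =>
    intro bigs needed ord _
    simp only [fruitLoop1]
    by_cases hb : ord - 5 < 0
    · rw [if_pos hb]
      show ord - 5 = _
      split_ifs <;> push_cast <;> omega
    · rw [if_neg hb]
      rcases Nat.eq_zero_or_pos n with hz | hpos
      · subst hz
        show ord - 5 = _
        split_ifs <;> push_cast <;> omega
      · rw [ih _ _ _ hpos]
        split_ifs <;> push_cast <;> omega

-- A's second loop: with at least one iteration, the final reassignment wins
lemma fruitLoop2_spec : ∀ (n : Nat) (needed smalls : Int),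
    fruitLoop2 (n + 1) needed smalls
      = if needed < 0 then 5 + needed else if needed > 0 then needed else smalls := by
  intro n
  induction n with
  | zero => intro needed smalls; simp [fruitLoop2]
  | succ n ih =>
    intro needed smalls
    show fruitLoop2 (n + 1) needed _ = _
    rw [ih]; split_ifs <;> rfl

lemma floordiv_max (ord : Int) :
    PySem.Int.floordiv (max ord 0) 5 = (max ord 0) / 5 :=
  PySem.Int.floordiv_eq_ediv_of_pos (by omega)

theorem fruit_order_spec : Claim_unchanged_fruit_order := by
  intro s b ord _ hD
  show fruit_order s b ord = fruit_order_alt s b ord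
  simp only [fruit_order, fruit_order_alt, floordiv_max]
  by_cases hb : b > 0
  · simp only [hb, if_true]
    rw [fruitLoop1_needed b.toNat 0 0 ord (by omega),
        Int.toNat_of_nonneg (le_of_lt hb)]
    rcases Nat.eq_zero_or_pos s.toNat with hs | hs
    · rw [hs]
      unfold D_fruit_order at hD
      simp only [fruitLoop2]
      split_ifs <;> omega
    · obtain ⟨m, hm⟩ := Nat.exists_eq_add_of_le hs
      rw [hm, Nat.add_comm, fruitLoop2_spec]
      have hs1 : 1 ≤ s := by omega
      split_ifs <;> omega
  · simp only [hb, if_false]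
    split_ifs <;> omega

theorem fruit_order_changed : Claim_changed_fruit_order := by
  unfold Claim_changed_fruit_order; decide

theorem fruit_order_tight : Claim_exact_fruit_order := by
  intro s b ord _ hD
  obtain ⟨hb, hs, hD⟩ := hD
  simp only [fruit_order, fruit_order_alt, floordiv_max]
  simp only [hb, if_true]
  rw [fruitLoop1_needed b.toNat 0 0 ord (by omega),
      Int.toNat_of_nonneg (le_of_lt hb)]
  have h0 : s.toNat = 0 := by omega
  rw [h0]
  simp only [fruitLoop2]
  split_ifs <;> omega
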